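-- pv_equiv track=rewrite | github.com/Astra3/DiscordText | TextEdit.py | emojify
-- ===== SOURCE A (Python) =====
-- from typing import List, Tuple
--
-- def emojify(text: str, char_space: int = 1, space_size: int = 3, diakritika: bool = True) -> Tuple[str, List[str]]:
--     """
--     Converts text to emoji form, can also remove basic diacritics.
--
--     :param text: text to convert
--     :param char_space: space size between emoji characters
--     :param space_size: space size between words
--     :param diakritika: determines if diacritics should be removed
--     :return: returns tuple of converted text and characters that weren't converted
--     """
--     text = text.lower()
--     if diakritika:
--         # this dictionary removes diacritics
--         preklad = str.maketrans("áéíóúýčďěňřšťžů",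
--                                 "aeiouycdenrstzu")
--         text = text.translate(preklad)
--     b = ""
--     znaky = []
--     for i in text:
--         if i == " ":  # space is replaced for better readability
--             b += space_size * " "
--         elif i.isnumeric():  # jde o číslo
--             b += i + chr(0x20e3) + char_space * " "
--         elif i.isalpha() and i.isascii():  # means alphabetic char
--             b += chr(ord(i) + 127365) + char_space * " "  # adding 127365 outputs emoji version
--         else:  # chars that aren't numbers nor letters are saved here
--             b += i
--             znaky.append(i)
--
--     return b, znaky
-- ===== SOURCE B (Python) =====
-- from typing import List, Tuple
--
-- def emojify(text: str, char_space: int = 1, space_size: int = 3, diakritika: bool = True) -> Tuple[str, List[str]]: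
--     text = text.lower()
--     if diakritika:
--         text = text.translate(str.maketrans("áéíóúýčďěňřšťžů",
--                                             "aeiouycdenrstzu"))
--     # classify each distinct character once, building a translation table
--     table = {}
--     for c in dict.fromkeys(text):
--         if c == " ":
--             table[ord(c)] = space_size * " "
--         elif c.isnumeric():
--             table[ord(c)] = c + chr(0x20e3) + char_space * " "
--         elif c.isalpha() and c.isascii():
--             table[ord(c)] = chr(ord(c) + 127365) + char_space * " "
--     b = text.translate(table)
--     znaky = [c for c in text
--              if not (c == " " or c.isnumeric() or (c.isalpha() and c.isascii()))]
--     return b, znaky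
-- ===== Notes on version B (the rewrite author's own statement) =====
-- stated objective: idiomatic
-- what changed: Replaces A's per-character if/elif chain appending to an accumulator string with a translation table built once over the distinct characters, a single text.translate(table) call for the converted text, and a comprehension for the unconverted characters.
import Mathlib
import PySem

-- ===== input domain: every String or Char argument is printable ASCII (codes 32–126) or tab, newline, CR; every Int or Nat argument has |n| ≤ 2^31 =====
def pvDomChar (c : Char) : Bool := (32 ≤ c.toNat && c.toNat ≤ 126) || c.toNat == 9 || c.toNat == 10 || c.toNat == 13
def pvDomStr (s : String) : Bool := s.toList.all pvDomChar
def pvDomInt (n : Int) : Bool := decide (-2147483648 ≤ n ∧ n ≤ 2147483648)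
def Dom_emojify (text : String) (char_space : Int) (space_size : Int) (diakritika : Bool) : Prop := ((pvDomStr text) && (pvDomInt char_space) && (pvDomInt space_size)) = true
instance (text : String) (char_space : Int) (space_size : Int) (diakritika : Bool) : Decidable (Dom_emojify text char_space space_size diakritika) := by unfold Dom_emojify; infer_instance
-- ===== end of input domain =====

-- B replaces A's per-character if/elif accumulation by a translation table built once over the
-- distinct characters plus a single translate pass and a comprehension for znaky (objective:
-- idiomatic; same cost).

-- ===== PORT A =====

-- shared preprocessing present verbatim in both Pythons: text.lower(), then (if diakritika)
-- translate via the maketrans diacritics table.  Exact on the ASCII domain (the diacritic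
-- source characters are outside Dom, where they map as in Python anyway).
def odstranDiak (c : Char) : Char :=
  if c = 'á' then 'a' else if c = 'é' then 'e' else if c = 'í' then 'i'
  else if c = 'ó' then 'o' else if c = 'ú' then 'u' else if c = 'ý' then 'y'
  else if c = 'č' then 'c' else if c = 'ď' then 'd' else if c = 'ě' then 'e'
  else if c = 'ň' then 'n' else if c = 'ř' then 'r' else if c = 'š' then 's'
  else if c = 'ť' then 't' else if c = 'ž' then 'z' else if c = 'ů' then 'u'
  else c

def preproc (text : String) (diakritika : Bool) : List Char :=
  let t := PySem.Chars.lower text.toList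
  if diakritika then t.map odstranDiak else t

-- i.isnumeric() ported as PySem.Chars.isdigit and i.isascii() as toNat ≤ 127: exact on the
-- ASCII domain.  n * " " is List.replicate n.toNat ' ' (Python clamps negative n to "").
-- A's loop body, one step of the fold over (b, znaky):
def emojiStepA (char_space space_size : Int) (acc : List Char × List String) (i : Char) :
    List Char × List String :=
  if i = ' ' then (acc.1 ++ List.replicate space_size.toNat ' ', acc.2)
  else if PySem.Chars.isdigit i then
    (acc.1 ++ [i, Char.ofNat 0x20e3] ++ List.replicate char_space.toNat ' ', acc.2)
  else if PySem.Chars.isalpha i && decide (i.toNat ≤ 127) then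
    (acc.1 ++ [Char.ofNat (i.toNat + 127365)] ++ List.replicate char_space.toNat ' ', acc.2)
  else (acc.1 ++ [i], acc.2 ++ [String.singleton i])

def emojify (text : String) (char_space : Int) (space_size : Int) (diakritika : Bool) :
    String × List String :=
  let t := preproc text diakritika
  let r := t.foldl (emojiStepA char_space space_size) ([], [])
  (String.ofList r.1, r.2)

-- ===== PORT B =====

-- one step of building the translation table (Source B's for-loop body over distinct chars);
-- keyed by Char (ord is injective, so an Int-keyed and a Char-keyed table look up alike)
def tableStep (char_space space_size : Int) (d : PySem.Dict Char (List Char)) (c : Char) :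
    PySem.Dict Char (List Char) :=
  if c = ' ' then d.insert c (List.replicate space_size.toNat ' ')
  else if PySem.Chars.isdigit c then
    d.insert c ([c, Char.ofNat 0x20e3] ++ List.replicate char_space.toNat ' ')
  else if PySem.Chars.isalpha c && decide (c.toNat ≤ 127) then
    d.insert c ([Char.ofNat (c.toNat + 127365)] ++ List.replicate char_space.toNat ' ')
  else d

def emojify_alt (text : String) (char_space : Int) (space_size : Int) (diakritika : Bool) :
    String × List String :=
  let t := preproc text diakritika
  -- dict.fromkeys(text) = PySem.List.dedup t
  let table := (PySem.List.dedup t).foldl (tableStep char_space space_size) PySem.Dict.empty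
  -- text.translate(table): each char replaced by its table entry, untabled chars pass through
  let b := t.flatMap (fun c => (table.get? c).getD [c])
  let znaky := t.filterMap (fun c =>
    if c = ' ' || PySem.Chars.isdigit c || (PySem.Chars.isalpha c && decide (c.toNat ≤ 127))
    then none else some (String.singleton c))
  (String.ofList b, znaky)

-- ===== PRECONDITION & SPEC =====
def Spec_emojify (text : String) (char_space : Int) (space_size : Int) (diakritika : Bool) (out : String × List String) : Prop := out = emojify_alt text char_space space_size diakritika
instance (text : String) (char_space : Int) (space_size : Int) (diakritika : Bool) (out : String × List String) : Decidable (Spec_emojify text char_space space_size diakritika out) := by unfold Spec_emojify; infer_instance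

-- ===== CLAIM (what is proved, stated in full; the proofs are below) =====
def Claim_equal_emojify : Prop := ∀ (text : String) (char_space : Int) (space_size : Int) (diakritika : Bool), Dom_emojify text char_space space_size diakritika → Spec_emojify text char_space space_size diakritika (emojify text char_space space_size diakritika)

-- ===== LEMMAS AND PROOFS =====

-- the replacement a classified char gets (proof-side characterisation)
def replVal (char_space space_size : Int) (c : Char) : List Char :=
  if c = ' ' then List.replicate space_size.toNat ' '
  else if PySem.Chars.isdigit c then [c, Char.ofNat 0x20e3] ++ List.replicate char_space.toNat ' '
  else [Char.ofNat (c.toNat + 127365)] ++ List.replicate char_space.toNat ' '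

def classified (c : Char) : Bool :=
  c = ' ' || PySem.Chars.isdigit c || (PySem.Chars.isalpha c && decide (c.toNat ≤ 127))

theorem build_get (char_space space_size : Int) (ds : List Char)
    (d : PySem.Dict Char (List Char)) (c : Char) :
    ((ds.foldl (tableStep char_space space_size) d).get? c) =
      if c ∈ ds ∧ classified c then some (replVal char_space space_size c) else d.get? c := by
  induction ds generalizing d with
  | nil => simp
  | cons x ds ih =>
    simp only [List.foldl_cons, ih, List.mem_cons]
    by_cases hx : c = x
    · subst hx
      by_cases hmem : c ∈ ds ∧ classified c
      · simp [hmem]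
      · simp only [hmem, if_false, true_or]
        unfold tableStep replVal classified
        by_cases h1 : c = ' '
        · simp [h1]
        · by_cases h2 : PySem.Chars.isdigit c
          · simp [h1, h2]
          · by_cases h3 : PySem.Chars.isalpha c && decide (c.toNat ≤ 127)
            · simp [h1, h2, h3]
            · simp [h1, h2, h3]
    · have hstep : (tableStep char_space space_size d x).get? c = d.get? c := by
        unfold tableStep
        split_ifs <;> simp [PySem.Dict.get?_insert, hx]
      rw [hstep]
      simp [hx]

theorem loop_eq (char_space space_size : Int) (ds t : List Char)
    (hsub : ∀ c ∈ t, c ∈ ds) (b : List Char) (z : List String) :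
    t.foldl (emojiStepA char_space space_size) (b, z) =
      (b ++ t.flatMap (fun c =>
        (((ds.foldl (tableStep char_space space_size) PySem.Dict.empty).get? c)).getD [c]),
       z ++ t.filterMap (fun c => if classified c then none else some (String.singleton c))) := by
  induction t generalizing b z with
  | nil => simp
  | cons x t ih =>
    have hx : x ∈ ds := hsub x (List.mem_cons_self ..)
    have hsub' : ∀ c ∈ t, c ∈ ds := fun c hc => hsub c (List.mem_cons_of_mem _ hc)
    simp only [List.foldl_cons, List.flatMap_cons, List.filterMap_cons]
    rw [ih hsub']
    rw [build_get]
    unfold emojiStepA classified replVal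
    by_cases h1 : x = ' '
    · subst h1; simp [hx]
    · by_cases h2 : PySem.Chars.isdigit x
      · simp [h1, h2, hx]
      · by_cases h3 : PySem.Chars.isalpha x && decide (x.toNat ≤ 127)
        · simp [h1, h2, h3, hx]
        · simp [h1, h2, h3]

-- ===== VERDICT (by name: the statement is the Claim_ definition above) =====
theorem emojify_spec : Claim_equal_emojify := by
  intro text char_space space_size diakritika _
  unfold Spec_emojify emojify emojify_alt
  simp only
  rw [loop_eq char_space space_size (PySem.List.dedup (preproc text diakritika))
        (preproc text diakritika) (fun c hc => (PySem.List.mem_dedup _ _).2 hc) [] []]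
  simp only [List.nil_append]
  rfl
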